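-- pv_equiv track=rewrite | github.com/S1ngularD2ality/eidonic-language-elol | eidonic_language_of_light/401-500_ai_collaboration_&_multimodal_intelligence/glyph_500.py | glyph_500
-- ===== SOURCE A (Python) =====
-- from typing import Sequence
--
-- def glyph_500(cron_minutes: Sequence[int], now_minute: int) -> int:
--     """
--     Dawn Chorus — return next scheduled minute ≥ now from sorted cron list.
--
--     Overview
--     --------
--     If none ≥ now, returns first entry (wrap).
--
--     Parameters
--     ----------
--     cron_minutes : Sequence[int]  (sorted ascending, 0..59)
--     now_minute   : int            (0..59)
--
--     Returns
--     -------
--     int : minute value in 0..59, or -1 if list empty.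
--
--     Examples
--     --------
--     >>> glyph_500([0,15,30], 20)
--     30
--
--     Exceptions
--     ----------
--     (none)
--
--     Complexity
--     ----------
--     - Time  : O(log n)  (binary search)
--     - Space : O(1)
--     """
--     arr = list(cron_minutes)
--     if not arr:
--         return -1
--     # Binary search for lower_bound
--     lo, hi = 0, len(arr)
--     while lo < hi:
--         mid = (lo + hi) // 2
--         if arr[mid] < now_minute:
--             lo = mid + 1
--         else:
--             hi = mid
--     return arr[lo] if lo < len(arr) else arr[0]
-- ===== SOURCE B (Python) =====
-- def glyph_500(cron_minutes, now_minute):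
--     arr = list(cron_minutes)
--     if not arr:
--         return -1
--     for x in arr:
--         if x >= now_minute:
--             return x
--     return arr[0]
-- ===== Notes on version B (the rewrite author's own statement) =====
-- stated objective: simpler
-- what changed: Replaced the index-based binary search (lower bound, then wrap) with a single left-to-right scan that returns the first element >= now_minute, wrapping to arr[0] if none; Pre_ excludes unsorted lists with elements on both sides of now_minute, outside the documented sorted-ascending domain, where A's binary-search pick is an artefact of the probe sequence.
-- outside the precondition, e.g. on glyph_500([3, 1, 2], 2): A returns 2, B returns 3
import Mathlib
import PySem

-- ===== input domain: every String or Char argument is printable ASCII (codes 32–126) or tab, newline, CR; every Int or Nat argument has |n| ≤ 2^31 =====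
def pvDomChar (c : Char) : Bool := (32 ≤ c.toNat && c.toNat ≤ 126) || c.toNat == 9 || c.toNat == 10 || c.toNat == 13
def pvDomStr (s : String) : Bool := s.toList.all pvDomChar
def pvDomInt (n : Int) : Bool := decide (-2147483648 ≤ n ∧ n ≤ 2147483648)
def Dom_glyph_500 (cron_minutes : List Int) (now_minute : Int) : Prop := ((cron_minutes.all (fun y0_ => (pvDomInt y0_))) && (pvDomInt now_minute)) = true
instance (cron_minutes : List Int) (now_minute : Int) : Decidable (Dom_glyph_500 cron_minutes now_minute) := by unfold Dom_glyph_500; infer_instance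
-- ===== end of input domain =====

-- B replaces A's binary search by a single left-to-right scan returning the first element ≥ now (simpler);
-- equal on ascending-sorted lists (the documented input domain, stated in Pre_).

-- ===== PORT A =====
-- Python's while-loop 'lo, hi' binary search; arr[mid] is always in range (0 ≤ lo ≤ mid < hi ≤ len),
-- so `getD mid 0` is exact here.
def glyphLoopA (arr : List Int) (now : Int) (lo hi : Nat) : Nat :=
  if _h : lo < hi then
    -- mid := (lo + hi) // 2, inlined
    if arr.getD ((lo + hi) / 2) 0 < now then glyphLoopA arr now ((lo + hi) / 2 + 1) hi
    else glyphLoopA arr now lo ((lo + hi) / 2)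
  else lo
termination_by hi - lo
decreasing_by all_goals omega

def glyph_500 (cron_minutes : List Int) (now_minute : Int) : Int :=
  let arr := cron_minutes
  if arr = [] then -1
  else
    let lo := glyphLoopA arr now_minute 0 arr.length
    if lo < arr.length then arr.getD lo 0 else arr.getD 0 0

-- ===== PORT B =====
-- the for-loop of Source B: first element ≥ now, as an Option
def glyphScanB (arr : List Int) (now : Int) : Option Int :=
  match arr with
  | [] => none
  | x :: rest => if now ≤ x then some x else glyphScanB rest now

def glyph_500_alt (cron_minutes : List Int) (now_minute : Int) : Int :=
  let arr := cron_minutes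
  if arr = [] then -1
  else
    match glyphScanB arr now_minute with
    | some v => v
    | none => arr.getD 0 0

-- ===== PRECONDITION & SPEC =====
-- Pre_ admits ascending-sorted lists — the input domain A's docstring states ("sorted ascending") — and also
-- any list whose entries all lie on one side of now_minute, where element order is irrelevant; on the remaining
-- (unsorted, mixed) lists A's binary-search result is an artefact of the probe sequence and is excluded.
def Pre_glyph_500 (cron_minutes : List Int) (now_minute : Int) : Prop :=
  cron_minutes.Pairwise (· ≤ ·) ∨ (∀ x ∈ cron_minutes, now_minute ≤ x) ∨ (∀ x ∈ cron_minutes, x < now_minute)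
instance (cron_minutes : List Int) (now_minute : Int) : Decidable (Pre_glyph_500 cron_minutes now_minute) := by unfold Pre_glyph_500; infer_instance
def pvWitness_glyph_500 : List Int × Int := ([0, 15, 30], 20)

def Spec_glyph_500 (cron_minutes : List Int) (now_minute : Int) (out : Int) : Prop := out = glyph_500_alt cron_minutes now_minute
instance (cron_minutes : List Int) (now_minute : Int) (out : Int) : Decidable (Spec_glyph_500 cron_minutes now_minute out) := by unfold Spec_glyph_500; infer_instance

-- ===== CLAIM (what is proved, stated in full; the proofs are below) =====
def Claim_equal_glyph_500 : Prop := ∀ (cron_minutes : List Int) (now_minute : Int), Dom_glyph_500 cron_minutes now_minute → Pre_glyph_500 cron_minutes now_minute → Spec_glyph_500 cron_minutes now_minute (glyph_500 cron_minutes now_minute)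

-- ===== LEMMAS AND PROOFS =====

lemma getD_mono_of_pairwise {l : List Int} (h : l.Pairwise (· ≤ ·)) :
    ∀ i j, i ≤ j → j < l.length → l.getD i 0 ≤ l.getD j 0 := by
  intro i j hij hj
  rcases Nat.lt_or_ge i j with hlt | hge
  · have := (List.pairwise_iff_getElem.mp h) i j (by omega) hj hlt
    rwa [List.getD_eq_getElem l 0 (by omega), List.getD_eq_getElem l 0 hj]
  · have : i = j := by omega
    subst this; exact le_rfl

lemma loop_spec (l : List Int) (n : Int)
    (hs : ∀ i j, i ≤ j → j < l.length → l.getD i 0 ≤ l.getD j 0) :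
    ∀ k lo hi, hi - lo = k → lo ≤ hi → hi ≤ l.length →
      (∀ i, i < lo → l.getD i 0 < n) →
      (∀ i, hi ≤ i → i < l.length → n ≤ l.getD i 0) →
      (∀ i, i < glyphLoopA l n lo hi → l.getD i 0 < n) ∧
      glyphLoopA l n lo hi ≤ l.length ∧
      (glyphLoopA l n lo hi < l.length → n ≤ l.getD (glyphLoopA l n lo hi) 0) := by
  intro k
  induction k using Nat.strong_induction_on with
  | _ k ih =>
    intro lo hi hk hle hlen hlow hhigh
    rw [glyphLoopA]
    by_cases h : lo < hi
    · rw [dif_pos h]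
      by_cases hmid : l.getD ((lo + hi) / 2) 0 < n
      · rw [if_pos hmid]
        -- lo := mid + 1
        exact ih (hi - ((lo + hi) / 2 + 1)) (by omega) _ _ rfl (by omega) hlen
          (fun i hi' => lt_of_le_of_lt (hs i ((lo + hi) / 2) (by omega) (by omega)) hmid)
          hhigh
      · rw [if_neg hmid]
        -- hi := mid
        exact ih ((lo + hi) / 2 - lo) (by omega) _ _ rfl (by omega) (by omega)
          hlow
          (fun i hi1 hi2 => le_trans (not_lt.mp hmid) (hs ((lo + hi) / 2) i hi1 hi2))
    · rw [dif_neg h]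
      exact ⟨hlow, by omega, fun hlt => hhigh lo (by omega) hlt⟩

lemma loop_all_ge (l : List Int) (n : Int)
    (hall : ∀ i, i < l.length → n ≤ l.getD i 0) :
    ∀ k lo hi, hi - lo = k → hi ≤ l.length → glyphLoopA l n lo hi = lo := by
  intro k
  induction k using Nat.strong_induction_on with
  | _ k ih =>
    intro lo hi hk hlen
    rw [glyphLoopA]
    by_cases h : lo < hi
    · rw [dif_pos h, if_neg (not_lt.mpr (hall _ (by omega)))]
      exact ih ((lo + hi) / 2 - lo) (by omega) _ _ rfl (by omega)
    · rw [dif_neg h]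

lemma loop_all_lt (l : List Int) (n : Int)
    (hall : ∀ i, i < l.length → l.getD i 0 < n) :
    ∀ k lo hi, hi - lo = k → lo ≤ hi → hi ≤ l.length → glyphLoopA l n lo hi = hi := by
  intro k
  induction k using Nat.strong_induction_on with
  | _ k ih =>
    intro lo hi hk hle hlen
    rw [glyphLoopA]
    by_cases h : lo < hi
    · rw [dif_pos h, if_pos (hall _ (by omega))]
      exact ih (hi - ((lo + hi) / 2 + 1)) (by omega) _ _ rfl (by omega) hlen
    · rw [dif_neg h]; omega

lemma mem_of_idx (l : List Int) (P : Int → Prop) (h : ∀ x ∈ l, P x) :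
    ∀ i, i < l.length → P (l.getD i 0) := by
  intro i hi
  rw [List.getD_eq_getElem l 0 hi]
  exact h _ (List.getElem_mem hi)

lemma scan_none (l : List Int) (n : Int)
    (h : ∀ i, i < l.length → l.getD i 0 < n) : glyphScanB l n = none := by
  induction l with
  | nil => rfl
  | cons x xs ih =>
    have hx : x < n := by simpa using h 0 (by simp)
    simp only [glyphScanB, if_neg (not_le.mpr hx)]
    exact ih (fun i hi => by simpa using h (i + 1) (by simpa using hi))

lemma scan_some (l : List Int) (n : Int) :
    ∀ k, k < l.length → (∀ i, i < k → l.getD i 0 < n) → n ≤ l.getD k 0 →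
      glyphScanB l n = some (l.getD k 0) := by
  induction l with
  | nil => intro k hk; simp at hk
  | cons x xs ih =>
    intro k hk hlt hkge
    by_cases hx : n ≤ x
    · have hk0 : k = 0 := by
        by_contra h0
        have := hlt 0 (by omega)
        simp at this
        omega
      subst hk0
      simp [glyphScanB, hx]
    · have hk0 : k ≠ 0 := by
        rintro rfl
        simp at hkge
        omega
      obtain ⟨k', rfl⟩ := Nat.exists_eq_succ_of_ne_zero hk0
      simp only [glyphScanB, if_neg hx, List.getD_cons_succ]
      exact ih k' (by simpa using hk)
        (fun i hi => by simpa using hlt (i + 1) (by omega))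
        (by simpa using hkge)

-- ===== VERDICT (by name: the statement is the Claim_ definition above) =====
theorem glyph_500_spec : Claim_equal_glyph_500 := by
  unfold Claim_equal_glyph_500
  intro l n _ hpre
  unfold Spec_glyph_500 glyph_500 glyph_500_alt
  by_cases hnil : l = []
  · simp [hnil]
  · simp only [hnil, if_false]
    rcases hpre with hsort | hge | hlt
    · have hmono := getD_mono_of_pairwise hsort
      obtain ⟨h1, h2, h3⟩ := loop_spec l n hmono (l.length - 0) 0 l.length rfl
        (by omega) le_rfl (by omega) (by omega)
      by_cases hL : glyphLoopA l n 0 l.length < l.length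
      · rw [scan_some l n (glyphLoopA l n 0 l.length) hL h1 (h3 hL)]
        simp [hL]
      · rw [scan_none l n (fun i hi => h1 i (by omega))]
        simp [hL]
    · -- all entries ≥ now : both return the first entry
      have hall := mem_of_idx l _ hge
      rw [loop_all_ge l n hall (l.length - 0) 0 l.length rfl le_rfl]
      obtain ⟨x, xs, rfl⟩ := List.exists_cons_of_ne_nil hnil
      have hx : n ≤ x := hge x (by simp)
      simp [glyphScanB, hx]
    · -- all entries < now : wrap, both return the first entry
      have hall := mem_of_idx l _ hlt
      rw [loop_all_lt l n hall (l.length - 0) 0 l.length rfl (by omega) le_rfl]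
      rw [scan_none l n hall]
      simp
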